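-- pv_equiv track=rewrite | github.com/HatimMuqbel/Decisiongraph-core-v1.3 | decisiongraph-complete/src/kernel/precedent/precedent_scorer.py | detect_primary_typology
-- ===== SOURCE A (Python) =====
-- from typing import Any, Optional
--
-- def detect_primary_typology(
--     reason_codes: list[str],
--     case_facts: dict[str, Any] | None = None,
-- ) -> str | None:
--     """Detect the primary typology for similarity floor override.
--
--     Returns the typology key matching DomainRegistry.similarity_floor_overrides,
--     or None if no specific typology detected.
--     """
--     codes_upper = [c.upper() for c in (reason_codes or [])]
--     facts = case_facts or {}
--
--     # Sanctions — highest priority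
--     if any("SANCTION" in c or "RC-SCR" in c for c in codes_upper):
--         return "sanctions"
--     if facts.get("screening.sanctions_match") in (True, "true", "True"):
--         return "sanctions"
--
--     # Structuring
--     if any("STRUCT" in c for c in codes_upper):
--         return "structuring"
--     if facts.get("flag.structuring") in (True, "true", "True"):
--         return "structuring"
--
--     # Adverse media
--     if any("ADVERSE" in c for c in codes_upper):
--         return "adverse_media"
--     if facts.get("screening.adverse_media") in (True, "true", "True"):
--         return "adverse_media"
--
--     return None
-- ===== SOURCE B (Python) =====
-- _NAMES = ("sanctions", "structuring", "adverse_media")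
-- _FACT_RANKS = (
--     (1, "screening.sanctions_match"),
--     (3, "flag.structuring"),
--     (5, "screening.adverse_media"),
-- )
--
--
-- def _code_rank(u):
--     """Priority rank of one upper-cased code: 0/2/4 for a match, 6 for none."""
--     if "SANCTION" in u or "RC-SCR" in u:
--         return 0
--     if "STRUCT" in u:
--         return 2
--     if "ADVERSE" in u:
--         return 4
--     return 6
--
--
-- def detect_primary_typology(reason_codes, case_facts=None):
--     """Single pass: minimise a numeric priority rank over codes and facts, decode at the end."""
--     best = 6
--     for c in (reason_codes or []):
--         best = min(best, _code_rank(c.upper()))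
--     facts = case_facts or {}
--     for rank, key in _FACT_RANKS:
--         if rank < best and facts.get(key) in (True, "true", "True"):
--             best = rank
--     return _NAMES[best // 2] if best < 6 else None
-- ===== Notes on version B (the rewrite author's own statement) =====
-- stated objective: alternative
-- what changed: Instead of A's six staged early-return scans, B maps every code and fact to a numeric priority rank, takes the minimum in a single accumulator pass, and decodes the minimal rank back to a typology name at the end.
import Mathlib
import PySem

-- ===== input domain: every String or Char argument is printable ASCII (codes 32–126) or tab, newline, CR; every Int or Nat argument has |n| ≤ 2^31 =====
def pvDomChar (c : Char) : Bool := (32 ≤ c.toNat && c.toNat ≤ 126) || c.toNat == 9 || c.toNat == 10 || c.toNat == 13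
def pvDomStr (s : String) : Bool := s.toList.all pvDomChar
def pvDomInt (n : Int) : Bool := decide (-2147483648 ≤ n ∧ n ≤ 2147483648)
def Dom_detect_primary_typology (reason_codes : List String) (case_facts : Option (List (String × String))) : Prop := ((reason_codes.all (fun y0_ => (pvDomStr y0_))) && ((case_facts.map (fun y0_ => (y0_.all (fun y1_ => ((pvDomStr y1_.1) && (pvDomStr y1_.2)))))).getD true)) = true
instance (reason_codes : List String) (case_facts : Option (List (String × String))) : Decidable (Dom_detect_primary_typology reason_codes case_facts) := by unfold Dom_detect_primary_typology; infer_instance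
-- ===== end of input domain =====

-- B replaces A's six staged early-return scans by one pass that minimises a numeric priority rank and decodes it at the end (objective: alternative).
-- Dict values are Strings under the type convention, so the Python truthy test 'v in (True, "true", "True")' is v ∈ {"true", "True"}.

-- ===== PORT A =====
-- facts.get(key) in (True, "true", "True")
def pvTruthy (v : Option String) : Bool :=
  match v with
  | some s => s == "true" || s == "True"
  | none => false

def detect_primary_typology (reason_codes : List String) (case_facts : Option (List (String × String))) : Option String :=
  let codes_upper := reason_codes.map PySem.Str.upper
  let facts : PySem.Dict String String := PySem.Dict.mk (case_facts.getD [])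
  if codes_upper.any (fun c => PySem.Str.isIn "SANCTION" c || PySem.Str.isIn "RC-SCR" c) then some "sanctions"
  else if pvTruthy (facts.get? "screening.sanctions_match") then some "sanctions"
  else if codes_upper.any (fun c => PySem.Str.isIn "STRUCT" c) then some "structuring"
  else if pvTruthy (facts.get? "flag.structuring") then some "structuring"
  else if codes_upper.any (fun c => PySem.Str.isIn "ADVERSE" c) then some "adverse_media"
  else if pvTruthy (facts.get? "screening.adverse_media") then some "adverse_media"
  else none

-- ===== PORT B =====
def pvNames : List String := ["sanctions", "structuring", "adverse_media"]

def pvFactRanks : List (Nat × String) :=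
  [(1, "screening.sanctions_match"), (3, "flag.structuring"), (5, "screening.adverse_media")]

def pvCodeRank (u : String) : Nat :=
  if PySem.Str.isIn "SANCTION" u || PySem.Str.isIn "RC-SCR" u then 0
  else if PySem.Str.isIn "STRUCT" u then 2
  else if PySem.Str.isIn "ADVERSE" u then 4
  else 6

def detect_primary_typology_alt (reason_codes : List String) (case_facts : Option (List (String × String))) : Option String :=
  let best0 := reason_codes.foldl (fun b c => min b (pvCodeRank (PySem.Str.upper c))) 6
  let facts : PySem.Dict String String := PySem.Dict.mk (case_facts.getD [])
  let best := pvFactRanks.foldl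
    (fun b p => if p.1 < b && pvTruthy (facts.get? p.2) then p.1 else b) best0
  -- _NAMES[best // 2]: the index is always in range when best < 6, so getElem? carries the Optional return
  if best < 6 then pvNames[best / 2]? else none

-- ===== PRECONDITION & SPEC =====
def Spec_detect_primary_typology (reason_codes : List String) (case_facts : Option (List (String × String))) (out : Option String) : Prop := out = detect_primary_typology_alt reason_codes case_facts
instance (reason_codes : List String) (case_facts : Option (List (String × String))) (out : Option String) : Decidable (Spec_detect_primary_typology reason_codes case_facts out) := by unfold Spec_detect_primary_typology; infer_instance

-- ===== CLAIM (what is proved, stated in full; the proofs are below) =====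
def Claim_equal_detect_primary_typology : Prop := ∀ (reason_codes : List String) (case_facts : Option (List (String × String))), Dom_detect_primary_typology reason_codes case_facts → Spec_detect_primary_typology reason_codes case_facts (detect_primary_typology reason_codes case_facts)

-- ===== LEMMAS AND PROOFS =====

-- The min-fold over per-code ranks equals the staged any-scan characterisation.
theorem pvRankFold (l : List String) (a : Nat) (ha : a ≤ 6) :
    l.foldl (fun b c => min b (pvCodeRank (PySem.Str.upper c))) a =
      min a
        (if (l.map PySem.Str.upper).any (fun c => PySem.Str.isIn "SANCTION" c || PySem.Str.isIn "RC-SCR" c) then 0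
         else if (l.map PySem.Str.upper).any (fun c => PySem.Str.isIn "STRUCT" c) then 2
         else if (l.map PySem.Str.upper).any (fun c => PySem.Str.isIn "ADVERSE" c) then 4
         else 6) := by
  induction l generalizing a with
  | nil => simp; omega
  | cons hd tl ih =>
    simp only [List.foldl_cons, List.map_cons, List.any_cons]
    rw [ih (min a (pvCodeRank (PySem.Str.upper hd))) (by unfold pvCodeRank; split_ifs <;> omega)]
    unfold pvCodeRank
    rcases Bool.eq_false_or_eq_true (PySem.Str.isIn "SANCTION" (PySem.Str.upper hd) || PySem.Str.isIn "RC-SCR" (PySem.Str.upper hd)) with hA | hA <;>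
      simp only [hA, Bool.false_or, Bool.true_or, Bool.false_eq_true, if_true, if_false] <;>
    rcases Bool.eq_false_or_eq_true (PySem.Str.isIn "STRUCT" (PySem.Str.upper hd)) with hS | hS <;>
      (try simp only [hS, Bool.false_or, Bool.true_or, Bool.false_eq_true, if_true, if_false]) <;>
    rcases Bool.eq_false_or_eq_true (PySem.Str.isIn "ADVERSE" (PySem.Str.upper hd)) with hD | hD <;>
      (try simp only [hD, Bool.false_or, Bool.true_or, Bool.false_eq_true, if_true, if_false]) <;>
    split_ifs <;> omega

-- Boolean shape of the whole computation: A's six-branch chain vs B's rank minimisation.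
theorem pvShape (a c e f1 f2 f3 : Bool) :
    (if a then some "sanctions"
     else if f1 then some "sanctions"
     else if c then some "structuring"
     else if f2 then some "structuring"
     else if e then some "adverse_media"
     else if f3 then some "adverse_media"
     else none) =
    (let best0 : Nat := min 6 (if a then 0 else if c then 2 else if e then 4 else 6)
     let b1 := if 1 < best0 && f1 then 1 else best0
     let b2 := if 3 < b1 && f2 then 3 else b1
     let best := if 5 < b2 && f3 then 5 else b2
     if best < 6 then pvNames[best / 2]? else none) := by
  cases a <;> cases c <;> cases e <;> cases f1 <;> cases f2 <;> cases f3 <;> rfl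

-- ===== VERDICT (by name: the statement is the Claim_ definition above) =====
theorem detect_primary_typology_spec : Claim_equal_detect_primary_typology := by
  intro rc cf _
  unfold Spec_detect_primary_typology detect_primary_typology detect_primary_typology_alt pvFactRanks
  simp only [List.foldl_cons, List.foldl_nil]
  rw [pvRankFold rc 6 (by omega)]
  exact pvShape _ _ _ _ _ _
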